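-- pv_equiv track=rewrite | github.com/gersteinlab/BioCoder | evaluation/ImageBuilder/start_test.py | can_ignore_string
-- ===== SOURCE A (Python) =====
-- def can_ignore_string(string: str):
--     # ignorable_characters are numbers, decimals, percents, and spaces
--     ignorable_characters = "0123456789e.%():=-+, "
--     # detect if string can be converted into a hex number
--     try:
--         int(string, 16)
--         return True
--     except:
--         pass
--
--     for i in range(len(string)):
--         if string[i] not in ignorable_characters:
--             return False
--     return True
-- ===== SOURCE B (Python) =====
-- def can_ignore_string(string: str):
--     # hex check kept as in the original: int(string, 16) succeeding means True
--     try: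
--         int(string, 16)
--         return True
--     except:
--         pass
--     # sort-then-merge: sort both the string's characters and the ignorable
--     # characters, then check containment with one two-pointer merge pass.
--     # The pointer only moves forward past allowed chars smaller than the
--     # current char; equal chars leave it in place, so duplicates are fine.
--     allowed = sorted("0123456789e.%():=-+, ")
--     i = 0
--     for c in sorted(string):
--         while i < len(allowed) and allowed[i] < c:
--             i += 1
--         if i == len(allowed) or allowed[i] != c:
--             return False
--     return True
-- ===== Notes on version B (the rewrite author's own statement) =====
-- stated objective: alternative
-- what changed: The per-index membership scan with early return is replaced by sorting the string's characters and the ignorable characters and checking containment with a single two-pointer merge pass; the hex try/except stays identical.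
import Mathlib
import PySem

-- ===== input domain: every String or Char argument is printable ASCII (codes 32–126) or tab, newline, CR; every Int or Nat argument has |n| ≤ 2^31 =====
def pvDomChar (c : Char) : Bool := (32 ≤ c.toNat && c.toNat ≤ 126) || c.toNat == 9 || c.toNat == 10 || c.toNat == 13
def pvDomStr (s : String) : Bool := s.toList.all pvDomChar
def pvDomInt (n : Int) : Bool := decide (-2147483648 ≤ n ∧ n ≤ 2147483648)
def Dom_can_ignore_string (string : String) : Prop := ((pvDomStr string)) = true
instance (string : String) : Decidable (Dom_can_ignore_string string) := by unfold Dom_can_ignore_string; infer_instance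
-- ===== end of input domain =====

-- B replaces A's per-index membership scan (early return) by sorting both character lists and a single two-pointer merge containment pass; the hex try/except branch is unchanged.


-- ===== PORT A =====
def ignorableChars : List Char := "0123456789e.%():=-+, ".toList

-- A's for-loop over the characters: early return False on a non-ignorable char
def scanIgnore : List Char → Bool
  | [] => true
  | c :: cs => if c ∈ ignorableChars then scanIgnore cs else false

def can_ignore_string (string : String) : Bool :=
  match PySem.Int.ofStrBase? string 16 with   -- try: int(string, 16); return True
  | some _ => true
  | none => scanIgnore string.toList

-- ===== PORT B =====
-- Source B's inner 'while i < len(allowed) and allowed[i] < c: i += 1'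
def advancePtr (allowed : List Char) (c : Char) (i : Nat) : Nat :=
  if h : i < allowed.length then
    if allowed[i] < c then advancePtr allowed c (i + 1) else i
  else i
termination_by allowed.length - i

-- Source B's for-loop over the sorted characters with the pointer i as state
def mergeCheck (allowed : List Char) : List Char → Nat → Bool
  | [], _ => true
  | c :: cs, i =>
    let j := advancePtr allowed c i
    if h : j < allowed.length then
      if allowed[j] = c then mergeCheck allowed cs j else false
    else false

def can_ignore_string_alt (string : String) : Bool :=
  match PySem.Int.ofStrBase? string 16 with   -- same try/except hex check
  | some _ => true
  | none =>
    mergeCheck (PySem.List.sorted ignorableChars (fun c => c) false)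
      (PySem.List.sorted string.toList (fun c => c) false) 0

-- ===== PRECONDITION & SPEC =====
def Spec_can_ignore_string (string : String) (out : Bool) : Prop := out = can_ignore_string_alt string
instance (string : String) (out : Bool) : Decidable (Spec_can_ignore_string string out) := by unfold Spec_can_ignore_string; infer_instance

-- ===== CLAIM (what is proved, stated in full; the proofs are below) =====
def Claim_equal_can_ignore_string : Prop := ∀ (string : String), Dom_can_ignore_string string → Spec_can_ignore_string string (can_ignore_string string)

-- ===== LEMMAS AND PROOFS =====
theorem scanIgnore_eq_true_iff (cs : List Char) : scanIgnore cs = true ↔ ∀ c ∈ cs, c ∈ ignorableChars := by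
  induction cs with
  | nil => simp [scanIgnore]
  | cons c cs ih => by_cases h : c ∈ ignorableChars <;> simp [scanIgnore, h, ih]

theorem advancePtr_le (allowed : List Char) (c : Char) (i : Nat) : i ≤ advancePtr allowed c i := by
  by_cases h1 : i < allowed.length
  · by_cases h2 : allowed[i] < c
    · rw [advancePtr, dif_pos h1, if_pos h2]
      have := advancePtr_le allowed c (i + 1)
      omega
    · rw [advancePtr, dif_pos h1, if_neg h2]
  · rw [advancePtr, dif_neg h1]
termination_by allowed.length - i

theorem advancePtr_le_length (allowed : List Char) (c : Char) (i : Nat) (h : i ≤ allowed.length) :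
    advancePtr allowed c i ≤ allowed.length := by
  by_cases h1 : i < allowed.length
  · by_cases h2 : allowed[i] < c
    · rw [advancePtr, dif_pos h1, if_pos h2]
      exact advancePtr_le_length allowed c (i + 1) (by omega)
    · rw [advancePtr, dif_pos h1, if_neg h2]; exact h
  · rw [advancePtr, dif_neg h1]; exact h
termination_by allowed.length - i

theorem advancePtr_skip (allowed : List Char) (c : Char) (i : Nat) :
    ∀ k (hk : k < allowed.length), i ≤ k → k < advancePtr allowed c i → allowed[k] < c := by
  intro k hk hik hkj
  by_cases h1 : i < allowed.length
  · by_cases h2 : allowed[i] < c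
    · rw [advancePtr, dif_pos h1, if_pos h2] at hkj
      by_cases hik2 : i = k
      · subst hik2; exact h2
      · exact advancePtr_skip allowed c (i + 1) k hk (by omega) hkj
    · rw [advancePtr, dif_pos h1, if_neg h2] at hkj; omega
  · rw [advancePtr, dif_neg h1] at hkj; omega
termination_by allowed.length - i

theorem advancePtr_stop (allowed : List Char) (c : Char) (i : Nat) :
    ∀ d, allowed[advancePtr allowed c i]? = some d → ¬ d < c := by
  by_cases h1 : i < allowed.length
  · by_cases h2 : allowed[i] < c
    · rw [advancePtr, dif_pos h1, if_pos h2]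
      exact advancePtr_stop allowed c (i + 1)
    · rw [advancePtr, dif_pos h1, if_neg h2]
      intro d hd
      rw [List.getElem?_eq_getElem h1] at hd
      cases hd
      exact h2
  · rw [advancePtr, dif_neg h1]
    intro d hd
    rw [List.getElem?_eq_none (by omega)] at hd
    cases hd
termination_by allowed.length - i

theorem mergeCheck_iff (allowed : List Char) (hA : allowed.Pairwise (· ≤ ·)) :
    ∀ (cs : List Char) (i : Nat), cs.Pairwise (· ≤ ·) → i ≤ allowed.length →
    (∀ k (hk : k < allowed.length), k < i → ∀ x ∈ cs, allowed[k] < x) →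
    (mergeCheck allowed cs i = true ↔ ∀ x ∈ cs, x ∈ allowed) := by
  intro cs
  induction cs with
  | nil => intro i _ _ _; simp [mergeCheck]
  | cons c cs ih =>
    intro i hS hi hinv
    have hS' : cs.Pairwise (· ≤ ·) := hS.of_cons
    have hc_le : ∀ x ∈ cs, c ≤ x := fun x hx => (List.pairwise_cons.mp hS).1 x hx
    have hij : i ≤ advancePtr allowed c i := advancePtr_le allowed c i
    have hjlen : advancePtr allowed c i ≤ allowed.length := advancePtr_le_length allowed c i hi
    have hbelow : ∀ k (hk : k < allowed.length), k < advancePtr allowed c i → allowed[k] < c := by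
      intro k hk hkj
      by_cases hki : k < i
      · exact hinv k hk hki c (List.mem_cons_self)
      · exact advancePtr_skip allowed c i k hk (by omega) hkj
    have hmono : ∀ p q (hp : p < allowed.length) (hq : q < allowed.length), p ≤ q →
        allowed[p] ≤ allowed[q] := by
      intro p q hp hq hpq
      rcases Nat.lt_or_ge p q with h | h
      · exact (List.pairwise_iff_getElem.mp hA) p q hp hq h
      · have : p = q := by omega
        subst this; exact le_refl _
    simp only [mergeCheck]
    split
    · rename_i hjlt
      split
      · rename_i heq
        have hcmem : c ∈ allowed := heq ▸ List.getElem_mem hjlt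
        rw [ih (advancePtr allowed c i) hS' hjlen (by
          intro k hk hkj x hx
          exact lt_of_lt_of_le (hbelow k hk hkj) (hc_le x hx))]
        constructor
        · intro h x hx
          rcases List.mem_cons.mp hx with rfl | hx'
          · exact hcmem
          · exact h x hx'
        · intro h x hx; exact h x (List.mem_cons_of_mem c hx)
      · rename_i hne
        have hstop : ¬ allowed[advancePtr allowed c i] < c :=
          advancePtr_stop allowed c i _ (List.getElem?_eq_getElem hjlt)
        have hcnot : c ∉ allowed := by
          intro hmem
          rcases List.mem_iff_getElem.mp hmem with ⟨k, hk, hkc⟩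
          rcases Nat.lt_or_ge k (advancePtr allowed c i) with hkj | hjk
          · exact absurd (hkc ▸ hbelow k hk hkj) (lt_irrefl c)
          · have hle : allowed[advancePtr allowed c i] ≤ allowed[k] := hmono _ k hjlt hk hjk
            rw [hkc] at hle
            rcases lt_or_eq_of_le hle with hlt | heq2
            · exact hstop hlt
            · exact hne heq2
        exact iff_of_false (by simp) (fun h => hcnot (h c (List.mem_cons_self)))
    · rename_i hge
      have hcnot : c ∉ allowed := by
        intro hmem
        rcases List.mem_iff_getElem.mp hmem with ⟨k, hk, hkc⟩
        have : allowed[k] < c := hbelow k hk (by omega)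
        rw [hkc] at this
        exact lt_irrefl c this
      exact iff_of_false (by simp) (fun h => hcnot (h c (List.mem_cons_self)))

theorem mergeCheck_eq_scan (s : List Char) :
    mergeCheck (PySem.List.sorted ignorableChars (fun c => c) false)
      (PySem.List.sorted s (fun c => c) false) 0 = scanIgnore s := by
  rw [Bool.eq_iff_iff, scanIgnore_eq_true_iff]
  rw [mergeCheck_iff _ (by simpa using PySem.List.sorted_pairwise ignorableChars (fun c => c))
      _ 0 (by simpa using PySem.List.sorted_pairwise s (fun c => c)) (Nat.zero_le _)
      (by intro k hk hki; omega)]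
  constructor
  · intro h c hc
    have := h c (by rw [PySem.List.mem_sorted]; exact hc)
    rwa [PySem.List.mem_sorted] at this
  · intro h c hc
    rw [PySem.List.mem_sorted] at hc
    rw [PySem.List.mem_sorted]
    exact h c hc

-- ===== VERDICT (by name: the statement is the Claim_ definition above) =====
theorem can_ignore_string_spec : Claim_equal_can_ignore_string := by
  intro s _
  unfold Spec_can_ignore_string can_ignore_string can_ignore_string_alt
  cases PySem.Int.ofStrBase? s 16 with
  | some v => rfl
  | none => exact (mergeCheck_eq_scan s.toList).symm
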